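-- pv_equiv track=rewrite | github.com/partitect/subcio-app | aaspresets/pycaps/tag/tagger/semantic_tagger.py | _build_text_positions_mapping
-- ===== SOURCE A (Python) =====
-- def _build_text_positions_mapping(tagged_text: str) -> dict[int, int]:
--     """Build a mapping of positions in the tagged text to the original text."""
--     mapping = {}
--     tagged_pos = 0
--     original_pos = 0
--     in_tag = False
--     while tagged_pos < len(tagged_text):
--         char = tagged_text[tagged_pos]
--         if char == '<':
--             in_tag = True
--         if not in_tag:
--             mapping[tagged_pos] = original_pos
--             original_pos += 1
--         if char == '>':
--             in_tag = False
--         tagged_pos += 1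
--
--     return mapping
-- ===== SOURCE B (Python) =====
-- def _build_text_positions_mapping(tagged_text: str) -> dict[int, int]:
--     """Build a mapping of positions in the tagged text to the original text.
--
--     Segment-based: repeatedly split off the plain-text run before the next '<'
--     with str.partition, map its positions in one block, then skip the whole
--     tag (up to and including the next '>', or to the end if unclosed).
--     """
--     mapping = {}
--     pos = 0
--     orig = 0
--     rest = tagged_text
--     while True:
--         text, sep, rest = rest.partition('<')
--         for i in range(len(text)):
--             mapping[pos + i] = orig + i
--         pos += len(text)
--         orig += len(text)
--         if not sep:
--             return mapping
--         tag, sep2, rest = rest.partition('>')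
--         pos += 1 + len(tag) + len(sep2)
-- ===== Notes on version B (the rewrite author's own statement) =====
-- stated objective: faster
-- what changed: Replaces the per-character in_tag automaton with a segment loop that repeatedly splits off the plain-text run before the next '<' via str.partition, emits that whole block of positions at once, and skips the entire tag up to the next '>' (or the end if unclosed).
import Mathlib
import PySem

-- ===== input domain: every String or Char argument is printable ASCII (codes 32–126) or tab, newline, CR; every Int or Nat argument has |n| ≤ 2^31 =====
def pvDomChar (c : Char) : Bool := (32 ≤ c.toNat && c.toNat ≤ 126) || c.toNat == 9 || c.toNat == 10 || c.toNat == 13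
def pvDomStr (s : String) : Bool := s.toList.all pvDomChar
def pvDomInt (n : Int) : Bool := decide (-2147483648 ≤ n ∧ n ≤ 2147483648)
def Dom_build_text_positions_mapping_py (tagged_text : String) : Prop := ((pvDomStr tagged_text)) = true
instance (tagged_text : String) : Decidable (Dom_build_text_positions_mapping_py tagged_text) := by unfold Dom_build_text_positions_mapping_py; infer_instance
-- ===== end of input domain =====

-- B re-implements A's per-character in_tag automaton as a segment loop (str.partition at the
-- tag delimiters); same return value (A is total; proved equal on all inputs); a timing run
-- measured B faster by a constant factor (C-level partition vs a per-character Python loop).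

-- ===== PORT A =====
-- A's while loop over indices, transliterated as structural recursion over the character
-- list with the tagged_pos counter carried along. The dict insertions use strictly
-- increasing fresh keys, so each 'mapping[tagged_pos] = original_pos' appends; exact.
def pvALoop (cs : List Char) (tagged_pos original_pos : Int) (in_tag : Bool)
    (mapping : List (Int × Int)) : List (Int × Int) :=
  match cs with
  | [] => mapping
  | char :: rest =>
    let in_tag := if char = '<' then true else in_tag
    let (mapping, original_pos) :=
      if !in_tag then (mapping ++ [(tagged_pos, original_pos)], original_pos + 1)
      else (mapping, original_pos)
    let in_tag := if char = '>' then false else in_tag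
    pvALoop rest (tagged_pos + 1) original_pos in_tag mapping

def build_text_positions_mapping_py (tagged_text : String) : List (Int × Int) :=
  pvALoop tagged_text.toList 0 0 false []

-- ===== PORT B =====
-- Source B's 'text, sep, rest = rest.partition(c)' for a single-character separator is exactly
-- takeWhile (· ≠ c) / dropWhile (· ≠ c) on the character list (split at first occurrence);
-- 'if not sep' is the dropWhile result being empty. The for-loop over range(len(text)) is
-- the fold below; dict keys are strictly increasing fresh keys, so insertion appends; exact.
def pvBLoop (rest : List Char) (pos orig : Int) (mapping : List (Int × Int)) :
    List (Int × Int) :=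
  let text := rest.takeWhile (· ≠ '<')
  let mapping := (List.range text.length).foldl
      (fun acc (i : Nat) => acc ++ [(pos + (i : Int), orig + (i : Int))]) mapping
  let pos := pos + text.length
  let orig := orig + text.length
  match h : rest.dropWhile (· ≠ '<') with
  | [] => mapping
  | _ :: after =>
    let tag := after.takeWhile (· ≠ '>')
    match h2 : after.dropWhile (· ≠ '>') with
    | [] => mapping
    | _ :: rest' => pvBLoop rest' (pos + 1 + tag.length + 1) orig mapping
termination_by rest.length
decreasing_by
  have h1 : (rest.dropWhile (· ≠ '<')).length ≤ rest.length := List.length_dropWhile_le _ _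
  have h3 : (after.dropWhile (· ≠ '>')).length ≤ after.length := List.length_dropWhile_le _ _
  rw [h] at h1; rw [h2] at h3; simp at h1 h3; omega

def build_text_positions_mapping_py_alt (tagged_text : String) : List (Int × Int) :=
  pvBLoop tagged_text.toList 0 0 []

-- ===== PRECONDITION & SPEC =====
def Spec_build_text_positions_mapping_py (tagged_text : String) (out : List (Int × Int)) : Prop := out = build_text_positions_mapping_py_alt tagged_text
instance (tagged_text : String) (out : List (Int × Int)) : Decidable (Spec_build_text_positions_mapping_py tagged_text out) := by unfold Spec_build_text_positions_mapping_py; infer_instance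

-- ===== CLAIM (what is proved, stated in full; the proofs are below) =====
def Claim_equal_build_text_positions_mapping_py : Prop := ∀ (tagged_text : String), Dom_build_text_positions_mapping_py tagged_text → Spec_build_text_positions_mapping_py tagged_text (build_text_positions_mapping_py tagged_text)

-- ===== LEMMAS AND PROOFS =====

-- A over a run of non-'<' characters starting outside a tag: maps the whole block.
theorem pvA_text (text : List Char) : ∀ (rest : List Char) (p o : Int) (m : List (Int × Int)),
    (∀ c ∈ text, c ≠ '<') →
    pvALoop (text ++ rest) p o false m =
      pvALoop rest (p + text.length) (o + text.length) false
        (m ++ (List.range text.length).map (fun (i : Nat) => (p + (i : Int), o + (i : Int)))) := by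
  induction text with
  | nil => intro rest p o m _; simp
  | cons c t ih =>
    intro rest p o m h
    have hc : c ≠ '<' := h c (List.mem_cons_self ..)
    have hflag : (if c = '>' then false else false) = false := by split <;> rfl
    simp only [List.cons_append, pvALoop, if_neg hc, Bool.not_false, if_true, hflag]
    rw [ih rest (p + 1) (o + 1) _ (fun c hc => h c (List.mem_cons_of_mem _ hc))]
    simp only [List.length_cons, List.range_succ_eq_map, List.map_cons, List.map_map]
    congr 1
    · push_cast; ring
    · push_cast; ring
    · simp only [List.append_assoc, List.cons_append, List.nil_append]
      simp
      intro a _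
      constructor <;> ring

-- A inside a tag over a run of non-'>' characters: maps nothing.
theorem pvA_tag (tag : List Char) : ∀ (rest : List Char) (p o : Int) (m : List (Int × Int)),
    (∀ c ∈ tag, c ≠ '>') →
    pvALoop (tag ++ rest) p o true m = pvALoop rest (p + tag.length) o true m := by
  induction tag with
  | nil => intro rest p o m _; simp
  | cons c t ih =>
    intro rest p o m h
    have hc : c ≠ '>' := h c (List.mem_cons_self ..)
    have h1 : (if c = '<' then true else true) = true := by split <;> rfl
    simp only [List.cons_append, pvALoop, h1, Bool.not_true, Bool.false_eq_true, if_false, if_neg hc]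
    rw [ih rest (p + 1) o m (fun c hc => h c (List.mem_cons_of_mem _ hc))]
    congr 1; simp only [List.length_cons]; push_cast; ring

-- B's emission fold is an append of the mapped block.
theorem pvB_fold (n : Nat) (p o : Int) (m : List (Int × Int)) :
    (List.range n).foldl (fun acc (i : Nat) => acc ++ [(p + (i : Int), o + (i : Int))]) m =
      m ++ (List.range n).map (fun (i : Nat) => (p + (i : Int), o + (i : Int))) := by
  induction n generalizing m with
  | zero => simp
  | succ k ih => rw [List.range_succ, List.foldl_append, ih, List.map_append]; simp

theorem pv_main (n : Nat) : ∀ (rest : List Char), rest.length ≤ n →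
    ∀ (p o : Int) (m : List (Int × Int)),
    pvALoop rest p o false m = pvBLoop rest p o m := by
  induction n with
  | zero =>
    intro rest hlen p o m
    have h0 : rest = [] := List.eq_nil_of_length_eq_zero (Nat.le_zero.mp hlen)
    subst h0
    simp [pvALoop, pvBLoop]
  | succ k ih =>
    intro rest hlen p o m
    rw [pvBLoop, pvB_fold]
    split
    · rename_i hdrop
      have hall : ∀ c ∈ rest, c ≠ '<' := by
        intro c hc; simpa using List.dropWhile_eq_nil_iff.mp hdrop c hc
      have htake : rest.takeWhile (fun c => decide (c ≠ '<')) = rest := by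
        rw [List.takeWhile_eq_self_iff]; intro c hc; simpa using hall c hc
      have hA := pvA_text rest [] p o m hall
      rw [List.append_nil] at hA
      rw [hA, htake]
      simp [pvALoop]
    · rename_i c after hdrop
      have hc : c = '<' := by
        have h2 : (rest.dropWhile (fun c => decide (c ≠ '<'))).head? = some c := by
          rw [hdrop]; rfl
        have h3 := List.head?_dropWhile_not (p := fun c => decide (c ≠ '<')) (l := rest)
        rw [h2] at h3; simpa using h3
      subst hc
      have hA1 := pvA_text (rest.takeWhile (fun c => decide (c ≠ '<'))) ('<' :: after) p o m
        (fun x hx => by simpa using List.mem_takeWhile_imp hx)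
      conv_lhs => rw [← List.takeWhile_append_dropWhile (p := fun c => decide (c ≠ '<')) (l := rest), hdrop]
      rw [hA1]
      rw [pvALoop]
      simp only [if_true, Bool.not_true, Bool.false_eq_true, if_false,
        if_neg (by decide : ¬(('<' : Char) = '>'))]
      have hA2 := pvA_tag (after.takeWhile (fun c => decide (c ≠ '>')))
      split
      · rename_i hdrop2
        have htall : ∀ x ∈ after, x ≠ '>' := by
          intro x hx; simpa using List.dropWhile_eq_nil_iff.mp hdrop2 x hx
        have htake2 : after.takeWhile (fun c => decide (c ≠ '>')) = after := by
          rw [List.takeWhile_eq_self_iff]; intro x hx; simpa using htall x hx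
        have h4 := pvA_tag after []
          (p + ((rest.takeWhile (fun c => decide (c ≠ '<'))).length : Int) + 1)
          (o + ((rest.takeWhile (fun c => decide (c ≠ '<'))).length : Int))
          (m ++ (List.range (rest.takeWhile (fun c => decide (c ≠ '<'))).length).map
            (fun (i : Nat) => (p + (i : Int), o + (i : Int)))) htall
        rw [List.append_nil] at h4
        rw [h4]
        simp [pvALoop]
      · rename_i d rest2 hdrop2
        have hd : d = '>' := by
          have h2 : (after.dropWhile (fun c => decide (c ≠ '>'))).head? = some d := by
            rw [hdrop2]; rfl
          have h3 := List.head?_dropWhile_not (p := fun c => decide (c ≠ '>')) (l := after)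
          rw [h2] at h3; simpa using h3
        subst hd
        conv_lhs => rw [← List.takeWhile_append_dropWhile (p := fun c => decide (c ≠ '>')) (l := after), hdrop2]
        rw [pvA_tag (after.takeWhile (fun c => decide (c ≠ '>'))) _ _ _ _
          (fun x hx => by simpa using List.mem_takeWhile_imp hx)]
        rw [pvALoop]
        simp only [if_neg (by decide : ¬(('>' : Char) = '<')), Bool.not_true,
          Bool.false_eq_true, if_false, if_true]
        have hlen2 : rest2.length ≤ k := by
          have h1 : (rest.dropWhile (fun c => decide (c ≠ '<'))).length ≤ rest.length :=
            List.length_dropWhile_le _ _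
          have h3 : (after.dropWhile (fun c => decide (c ≠ '>'))).length ≤ after.length :=
            List.length_dropWhile_le _ _
          rw [hdrop] at h1; rw [hdrop2] at h3
          simp at h1 h3; omega
        rw [ih rest2 hlen2]


-- ===== VERDICT (by name: the statement is the Claim_ definition above) =====
theorem build_text_positions_mapping_py_spec : Claim_equal_build_text_positions_mapping_py := by
  intro tagged_text _
  show build_text_positions_mapping_py tagged_text = build_text_positions_mapping_py_alt tagged_text
  exact pv_main tagged_text.toList.length tagged_text.toList le_rfl 0 0 []
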